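-- pv_equiv track=rewrite | github.com/kdm1171/programmers | python/programmers/level2/P_조이스틱.py | calcMoves
-- ===== SOURCE A (Python) =====
-- def checkAllVisited(visited):
--     for i in range(len(visited)):
--         if not visited[i]:
--             return False
--     return True
--
-- def calcMoves(reverseIndex, name):
--     visited = []
--     for i in name:
--         visited.append(i == 'A')
--
--     index = 0
--     inc = 1
--     count = 0
--     while True:
--         count += 1
--         if index == reverseIndex:
--             inc = -1
--         visited[index] = True
--         index += inc
--         if index < 0:
--             index = len(visited) - 1
--
--         if checkAllVisited(visited):
--             break
--
--     return count
-- ===== SOURCE B (Python) =====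
-- def calcMoves(reverseIndex, name):
--     # Closed form: the cursor walks 0,1,2,... and, if it ever stands on
--     # reverseIndex, reverses direction forever (wrapping -1 -> n-1).
--     n = len(name)
--     idxs = [i for i, c in enumerate(name) if c != 'A']
--     if not idxs:
--         return 1
--     m = idxs[-1]
--     if reverseIndex < 0 or reverseIndex >= m:
--         return m + 1
--     mn = [i for i in idxs if i > reverseIndex][0]
--     return 2 * reverseIndex + n - mn + 1
-- ===== Notes on version B (the rewrite author's own statement) =====
-- stated objective: faster
-- what changed: Replaced the step-by-step cursor simulation (which re-scans the whole visited list after every move) by a closed-form count computed from the largest non-'A' index and, when the reversal point is passed, the smallest non-'A' index beyond it.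
-- outside the precondition, e.g. on calcMoves(0, ''): A raises IndexError, B returns 1
import Mathlib
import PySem

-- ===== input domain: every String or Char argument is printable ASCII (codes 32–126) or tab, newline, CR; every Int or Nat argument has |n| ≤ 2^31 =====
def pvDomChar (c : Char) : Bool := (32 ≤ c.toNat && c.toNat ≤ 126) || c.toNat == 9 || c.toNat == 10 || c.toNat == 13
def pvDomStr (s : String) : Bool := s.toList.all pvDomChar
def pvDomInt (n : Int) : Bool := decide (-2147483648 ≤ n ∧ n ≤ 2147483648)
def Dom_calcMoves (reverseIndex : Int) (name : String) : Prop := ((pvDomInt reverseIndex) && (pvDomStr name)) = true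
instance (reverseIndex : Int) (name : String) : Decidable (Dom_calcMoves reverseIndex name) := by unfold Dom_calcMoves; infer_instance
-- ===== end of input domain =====

-- B replaces A's step-by-step cursor simulation (rescanning `visited` after every move)
-- by an O(n) closed form from the largest and smallest relevant non-'A' indices.

-- ===== PORT A =====
-- Python: for i in range(len(visited)): if not visited[i]: return False / return True
def checkAllVisited : List Bool → Bool
  | [] => true
  | b :: rest => if !b then false else checkAllVisited rest

-- The while-loop of A, with a fuel argument only to make it total in Lean.
-- `index.toNat`: on every iteration actually reached under Pre_calcMoves the index is
-- provably in [0, visited.length) (phase lemmas below), so this equals Python's visited[index].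
def calcMovesLoop (reverseIndex : Int) : Nat → List Bool → Int → Int → Int → Int
  | 0, _, _, _, count => count
  | fuel + 1, visited, index, inc, count =>
    let inc' := if index = reverseIndex then -1 else inc
    let visited' := visited.set index.toNat true
    let index' := if index + inc' < 0 then (visited'.length : Int) - 1 else index + inc'
    if checkAllVisited visited' then count + 1
    else calcMovesLoop reverseIndex fuel visited' index' inc' (count + 1)

def calcMoves (reverseIndex : Int) (name : String) : Int :=
  let visited := name.toList.map (fun c => c == 'A')
  -- fuel 3n+3 is proven sufficient below (the Python loop breaks within 2r+n+1 ≤ 3n steps)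
  calcMovesLoop reverseIndex (3 * visited.length + 3) visited 0 1 0

-- ===== PORT B =====
def calcMoves_alt (reverseIndex : Int) (name : String) : Int :=
  let L := name.toList
  let n : Int := L.length
  -- [i for i, c in enumerate(name) if c != 'A']  (getD is exact: i ranges over valid indices)
  let idxs : List Nat := (List.range L.length).filter (fun i => !(L.getD i 'A' == 'A'))
  match idxs.getLast? with
  | none => 1
  | some m =>
    if reverseIndex < 0 ∨ (m : Int) ≤ reverseIndex then (m : Int) + 1
    else
      -- the filtered list is nonempty here (m is in it), so headD's default is never used
      let mn : Nat := (idxs.filter (fun (i : Nat) => decide (reverseIndex < (i : Int)))).headD 0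
      2 * reverseIndex + n - (mn : Int) + 1

-- ===== PRECONDITION & SPEC =====
-- Pre_ excludes only the empty string, on which Python A raises IndexError (visited[0] on []).
def Pre_calcMoves (reverseIndex : Int) (name : String) : Prop := name ≠ ""
instance (reverseIndex : Int) (name : String) : Decidable (Pre_calcMoves reverseIndex name) := by unfold Pre_calcMoves; infer_instance
def pvWitness_calcMoves : Int × String := (2, "BAABB")

def Spec_calcMoves (reverseIndex : Int) (name : String) (out : Int) : Prop := out = calcMoves_alt reverseIndex name
instance (reverseIndex : Int) (name : String) (out : Int) : Decidable (Spec_calcMoves reverseIndex name out) := by unfold Spec_calcMoves; infer_instance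

-- ===== CLAIM (what is proved, stated in full; the proofs are below) =====
def Claim_equal_calcMoves : Prop := ∀ (reverseIndex : Int) (name : String), Dom_calcMoves reverseIndex name → Pre_calcMoves reverseIndex name → Spec_calcMoves reverseIndex name (calcMoves reverseIndex name)

-- ===== LEMMAS AND PROOFS =====

-- visited-list states as `mk n f`
def mkVis (n : Nat) (f : Nat → Bool) : List Bool := (List.range n).map f

theorem mkVis_length (n : Nat) (f : Nat → Bool) : (mkVis n f).length = n := by
  simp [mkVis]

theorem mkVis_congr (n : Nat) (f g : Nat → Bool) (h : ∀ i, i < n → f i = g i) :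
    mkVis n f = mkVis n g := by
  unfold mkVis
  exact List.map_congr_left fun i hi => h i (List.mem_range.mp hi)

theorem mkVis_set (n : Nat) (f : Nat → Bool) (k : Nat) :
    (mkVis n f).set k true = mkVis n (fun i => if i = k then true else f i) := by
  apply List.ext_getElem
  · simp [mkVis]
  · intro i h1 h2
    simp only [mkVis, List.getElem_set, List.getElem_map, List.getElem_range]
    by_cases hik : i = k
    · simp [hik]
    · simp [hik, Ne.symm hik]

theorem check_eq_all (l : List Bool) : checkAllVisited l = l.all id := by
  induction l with
  | nil => rfl
  | cons b t ih => cases b <;> simp [checkAllVisited, ih]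

theorem check_mkVis_true (n : Nat) (f : Nat → Bool) :
    checkAllVisited (mkVis n f) = true ↔ ∀ i, i < n → f i = true := by
  simp [check_eq_all, mkVis, List.all_eq_true]

theorem check_mkVis_false (n : Nat) (f : Nat → Bool) (j : Nat) (hj : j < n) (hf : f j = false) :
    checkAllVisited (mkVis n f) = false := by
  cases hc : checkAllVisited (mkVis n f) with
  | false => rfl
  | true => exact absurd ((check_mkVis_true n f).mp hc j hj) (by simp [hf])

-- Phase lemma, all-'A' case: the very first iteration breaks.
theorem loop_allA (r : Int) (n : Nat) (f : Nat → Bool) (h : ∀ i, i < n → f i = true)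
    (fuel : Nat) (cnt : Int) :
    calcMovesLoop r (fuel + 1) (mkVis n f) 0 1 cnt = cnt + 1 := by
  simp only [calcMovesLoop]
  rw [show ((0 : Int)).toNat = 0 from rfl, mkVis_set]
  have hc : checkAllVisited (mkVis n fun i => if i = 0 then true else f i) = true :=
    (check_mkVis_true _ _).mpr fun i hi => by
      by_cases h0 : i = 0 <;> simp [h0, h i hi]
  rw [hc]
  simp

-- Phase lemma, pure-forward case (reversal point never hit before the break):
-- m is the largest unvisited index.
theorem loop_fwd (r : Int) (n : Nat) (f : Nat → Bool) (m : Nat)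
    (hm : m < n) (hfm : f m = false) (hmax : ∀ j, m < j → j < n → f j = true)
    (hr : r < 0 ∨ (m : Int) ≤ r) :
    ∀ fuel k cnt, k ≤ m → m + 1 - k ≤ fuel →
      calcMovesLoop r fuel (mkVis n (fun i => f i || decide (i < k))) (k : Int) 1 cnt
        = cnt + ((m + 1 - k : Nat) : Int) := by
  intro fuel
  induction fuel with
  | zero => intro k cnt hk hf; omega
  | succ fuel ih =>
    intro k cnt hk hf
    simp only [calcMovesLoop]
    rw [show ((k : Int)).toNat = k from Int.toNat_natCast k, mkVis_set]
    by_cases hkm : k = m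
    · subst hkm
      have hc : checkAllVisited (mkVis n fun i => if i = k then true else f i || decide (i < k)) = true := by
        apply (check_mkVis_true _ _).mpr
        intro i hi
        by_cases hik : i = k
        · simp [hik]
        · rcases Nat.lt_or_ge i k with hlt | hge
          · simp [hik, hlt]
          · simp [hik, hmax i (by omega) hi]
      rw [hc]
      simp
    · have hklt : k < m := lt_of_le_of_ne hk hkm
      have hkr : ¬ ((k : Int) = r) := by rcases hr with h | h <;> omega
      rw [if_neg hkr]
      have hstate : mkVis n (fun i => if i = k then true else f i || decide (i < k))
          = mkVis n (fun i => f i || decide (i < k + 1)) := by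
        apply mkVis_congr
        intro i hi
        by_cases hik : i = k
        · simp [hik]
        · have hd : (decide (i < k)) = (decide (i < k + 1)) := by
            simp only [decide_eq_decide]; omega
          simp [hik, hd]
      rw [hstate]
      have hfalse : checkAllVisited (mkVis n fun i => f i || decide (i < k + 1)) = false := by
        apply check_mkVis_false n _ m hm
        simp [hfm]; omega
      rw [hfalse]
      rw [if_neg (by simp)]
      rw [if_neg (by omega), show (k : Int) + 1 = ((k + 1 : Nat) : Int) by push_cast; ring]
      rw [ih (k + 1) (cnt + 1) (by omega) (by omega)]
      omega

-- Phase lemma, wrapped-descent: index walks n-1, n-2, …, breaking at mn, the smallest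
-- unvisited index; everything ≤ r' and > j is already visited.
theorem loop_wrap (r : Int) (n : Nat) (f : Nat → Bool) (r' mn : Nat)
    (hr : r = (r' : Int)) (hmn : mn < n) (hfmn : f mn = false) (hrmn : r' < mn)
    (hmin : ∀ j, r' < j → j < mn → f j = true) :
    ∀ fuel j cnt, mn ≤ j → j < n → j - mn + 1 ≤ fuel →
      calcMovesLoop r fuel (mkVis n (fun i => f i || decide (i ≤ r') || decide (j < i))) (j : Int) (-1) cnt
        = cnt + ((j - mn + 1 : Nat) : Int) := by
  subst hr
  intro fuel
  induction fuel with
  | zero => intro j cnt h1 h2 h3; omega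
  | succ fuel ih =>
    intro j cnt h1 h2 h3
    have hj1 : 1 ≤ j := by omega
    simp only [calcMovesLoop]
    rw [if_neg (by omega : ¬ ((j : Int) = (r' : Int)))]
    rw [show ((j : Int)).toNat = j from Int.toNat_natCast j, mkVis_set]
    rw [if_neg (by omega : ¬ ((j : Int) + (-1) < 0))]
    by_cases hjmn : j = mn
    · subst hjmn
      have hc : checkAllVisited (mkVis n fun i => if i = j then true else f i || decide (i ≤ r') || decide (j < i)) = true := by
        apply (check_mkVis_true _ _).mpr
        intro i hi
        by_cases hij : i = j
        · simp [hij]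
        · rcases Nat.lt_or_ge r' i with hgt | hle
          · rcases Nat.lt_or_ge i j with hlt | hge
            · simp [hij, hmin i hgt hlt]
            · simp [hij, show j < i by omega]
          · simp [hij, hle]
      rw [hc]
      simp
    · have hstate : mkVis n (fun i => if i = j then true else f i || decide (i ≤ r') || decide (j < i))
          = mkVis n (fun i => f i || decide (i ≤ r') || decide (j - 1 < i)) := by
        apply mkVis_congr
        intro i hi
        by_cases hij : i = j
        · simp [hij]; omega
        · have hd : (decide (j < i)) = (decide (j - 1 < i)) := by
            simp only [decide_eq_decide]; omega
          simp [hij, hd]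
      rw [hstate]
      have hfalse : checkAllVisited (mkVis n fun i => f i || decide (i ≤ r') || decide (j - 1 < i)) = false := by
        apply check_mkVis_false n _ mn hmn
        simp [hfmn]
        omega
      rw [hfalse, if_neg (by simp)]
      rw [show (j : Int) + (-1) = ((j - 1 : Nat) : Int) by omega]
      rw [ih (j - 1) (cnt + 1) (by omega) (by omega) (by omega)]
      omega

-- Phase lemma, descent to 0 then wrap: index walks j, j-1, …, 0 (all already visited), wraps.
theorem loop_down (r : Int) (n : Nat) (f : Nat → Bool) (r' mn : Nat)
    (hr : r = (r' : Int)) (hmn : mn < n) (hfmn : f mn = false) (hrmn : r' < mn)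
    (hmin : ∀ j, r' < j → j < mn → f j = true) :
    ∀ fuel j cnt, j < r' → j + 1 + (n - mn) ≤ fuel →
      calcMovesLoop r fuel (mkVis n (fun i => f i || decide (i ≤ r'))) (j : Int) (-1) cnt
        = cnt + ((j + 1 + (n - mn) : Nat) : Int) := by
  subst hr
  intro fuel
  induction fuel with
  | zero => intro j cnt h1 h2; omega
  | succ fuel ih =>
    intro j cnt h1 h2
    simp only [calcMovesLoop]
    rw [if_neg (by omega : ¬ ((j : Int) = (r' : Int)))]
    rw [show ((j : Int)).toNat = j from Int.toNat_natCast j, mkVis_set]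
    have hstate : mkVis n (fun i => if i = j then true else f i || decide (i ≤ r'))
        = mkVis n (fun i => f i || decide (i ≤ r')) := by
      apply mkVis_congr
      intro i hi
      by_cases hij : i = j
      · simp [hij]; omega
      · simp [hij]
    rw [hstate]
    have hfalse : checkAllVisited (mkVis n fun i => f i || decide (i ≤ r')) = false := by
      apply check_mkVis_false n _ mn hmn
      simp [hfmn]
      omega
    rw [hfalse, if_neg (by simp)]
    by_cases hj0 : j = 0
    · subst hj0
      rw [if_pos (by omega : ((0 : Nat) : Int) + (-1) < 0), mkVis_length]
      have hstate2 : mkVis n (fun i => f i || decide (i ≤ r'))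
          = mkVis n (fun i => f i || decide (i ≤ r') || decide (n - 1 < i)) := by
        apply mkVis_congr
        intro i hi
        have hd : (decide (n - 1 < i)) = false := by simp; omega
        simp [hd]
      rw [hstate2]
      rw [show (n : Int) - 1 = ((n - 1 : Nat) : Int) by omega]
      rw [loop_wrap ((r' : Nat) : Int) n f r' mn rfl hmn hfmn hrmn hmin fuel (n - 1) (cnt + 1) (by omega) (by omega) (by omega)]
      omega
    · rw [if_neg (by omega : ¬ ((j : Int) + (-1) < 0))]
      rw [show (j : Int) + (-1) = ((j - 1 : Nat) : Int) by omega]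
      rw [ih (j - 1) (cnt + 1) (by omega) (by omega)]
      omega

-- Phase lemma, forward to the reversal point then flip.
theorem loop_fwd2 (r : Int) (n : Nat) (f : Nat → Bool) (r' mn : Nat)
    (hr : r = (r' : Int)) (hmn : mn < n) (hfmn : f mn = false) (hrmn : r' < mn)
    (hmin : ∀ j, r' < j → j < mn → f j = true) :
    ∀ fuel k cnt, k ≤ r' → (r' + 1 - k) + r' + (n - mn) ≤ fuel →
      calcMovesLoop r fuel (mkVis n (fun i => f i || decide (i < k))) (k : Int) 1 cnt
        = cnt + (((r' - k) + 1 + r' + (n - mn) : Nat) : Int) := by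
  subst hr
  intro fuel
  induction fuel with
  | zero => intro k cnt hk hf; omega
  | succ fuel ih =>
    intro k cnt hk hf
    simp only [calcMovesLoop]
    rw [show ((k : Int)).toNat = k from Int.toNat_natCast k, mkVis_set]
    by_cases hkr' : k = r'
    · subst hkr'
      rw [if_pos rfl]
      have hstate : mkVis n (fun i => if i = k then true else f i || decide (i < k))
          = mkVis n (fun i => f i || decide (i ≤ k)) := by
        apply mkVis_congr
        intro i hi
        by_cases hik : i = k
        · simp [hik]
        · have hd : (decide (i < k)) = (decide (i ≤ k)) := by
            simp only [decide_eq_decide]; omega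
          simp [hik, hd]
      rw [hstate]
      have hfalse : checkAllVisited (mkVis n fun i => f i || decide (i ≤ k)) = false := by
        apply check_mkVis_false n _ mn hmn
        simp [hfmn]
        omega
      rw [hfalse, if_neg (by simp)]
      by_cases hk0 : k = 0
      · subst hk0
        rw [if_pos (by omega : ((0 : Nat) : Int) + (-1) < 0), mkVis_length]
        have hstate2 : mkVis n (fun i => f i || decide (i ≤ 0))
            = mkVis n (fun i => f i || decide (i ≤ 0) || decide (n - 1 < i)) := by
          apply mkVis_congr
          intro i hi
          have hd : (decide (n - 1 < i)) = false := by simp; omega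
          simp [hd]
        rw [hstate2]
        rw [show (n : Int) - 1 = ((n - 1 : Nat) : Int) by omega]
        rw [loop_wrap (((0 : Nat) : Nat) : Int) n f 0 mn rfl hmn hfmn hrmn hmin fuel (n - 1) (cnt + 1) (by omega) (by omega) (by omega)]
        omega
      · rw [if_neg (by omega : ¬ ((k : Int) + (-1) < 0))]
        rw [show (k : Int) + (-1) = ((k - 1 : Nat) : Int) by omega]
        rw [loop_down ((k : Nat) : Int) n f k mn rfl hmn hfmn hrmn hmin fuel (k - 1) (cnt + 1) (by omega) (by omega)]
        omega
    · have hklt : k < r' := lt_of_le_of_ne hk hkr'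
      rw [if_neg (by omega : ¬ ((k : Int) = (r' : Int)))]
      have hstate : mkVis n (fun i => if i = k then true else f i || decide (i < k))
          = mkVis n (fun i => f i || decide (i < k + 1)) := by
        apply mkVis_congr
        intro i hi
        by_cases hik : i = k
        · simp [hik]
        · have hd : (decide (i < k)) = (decide (i < k + 1)) := by
            simp only [decide_eq_decide]; omega
          simp [hik, hd]
      rw [hstate]
      have hfalse : checkAllVisited (mkVis n fun i => f i || decide (i < k + 1)) = false := by
        apply check_mkVis_false n _ mn hmn
        simp [hfmn]
        omega
      rw [hfalse, if_neg (by simp)]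
      rw [if_neg (by omega), show (k : Int) + 1 = ((k + 1 : Nat) : Int) by push_cast; ring]
      rw [ih (k + 1) (cnt + 1) (by omega) (by omega)]
      omega

-- facts about B's sorted index list
theorem pw_le_getLast : ∀ (l : List Nat), l.Pairwise (· < ·) → ∀ (hne : l ≠ []) (x : Nat), x ∈ l → x ≤ l.getLast hne := by
  intro l
  induction l with
  | nil => intro _ hne; exact absurd rfl hne
  | cons a t ih =>
    intro h hne x hx
    cases t with
    | nil => simp at hx; simp [hx, List.getLast]
    | cons b t2 =>
      rw [List.getLast_cons (by simp)]
      rcases List.mem_cons.mp hx with rfl | hx2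
      · have := (List.pairwise_cons.mp h).1 _ (List.getLast_mem (l := b :: t2) (by simp))
        omega
      · exact ih (List.pairwise_cons.mp h).2 (by simp) x hx2

theorem pw_head_le (l : List Nat) (h : l.Pairwise (· < ·)) (x : Nat) (hx : x ∈ l)
    (hne : l ≠ []) : l.head hne ≤ x := by
  cases l with
  | nil => exact absurd rfl hne
  | cons a t =>
    rcases List.mem_cons.mp hx with rfl | hx2
    · exact le_refl _
    · exact le_of_lt ((List.pairwise_cons.mp h).1 x hx2)

theorem map_eq_mkVis (L : List Char) :
    L.map (fun c => c == 'A') = mkVis L.length (fun i => L.getD i 'A' == 'A') := by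
  apply List.ext_getElem
  · simp [mkVis]
  · intro i h1 h2
    have hi : i < L.length := by simpa [mkVis] using h2
    simp [mkVis, List.getD, List.getElem?_eq_getElem hi]

-- ===== VERDICT (by name: the statement is the Claim_ definition above) =====
theorem calcMoves_spec : Claim_equal_calcMoves := by
  intro r name _dom pre
  unfold Spec_calcMoves
  have hn0 : name.toList.length ≠ 0 := by
    intro h
    exact pre (by cases hE : name.toList with
      | nil => exact String.ext (by simp [hE])
      | cons a t => simp [hE] at h)
  -- abbreviations
  have hA0 : calcMoves r name
      = calcMovesLoop r (3 * name.toList.length + 3)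
          (mkVis name.toList.length (fun i => name.toList.getD i 'A' == 'A')) 0 1 0 := by
    simp only [calcMoves, map_eq_mkVis, mkVis_length]
  have hpw : ((List.range name.toList.length).filter
      (fun i => !(name.toList.getD i 'A' == 'A'))).Pairwise (· < ·) :=
    (List.pairwise_lt_range).filter _
  have hmem : ∀ i, i ∈ (List.range name.toList.length).filter
      (fun i => !(name.toList.getD i 'A' == 'A'))
      ↔ (i < name.toList.length ∧ (name.toList.getD i 'A' == 'A') = false) := by
    intro i
    simp [List.mem_filter, List.mem_range]
  rcases hL : ((List.range name.toList.length).filter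
      (fun i => !(name.toList.getD i 'A' == 'A'))).getLast? with _ | m
  · -- no non-'A' character: both sides are 1
    have hall : ∀ i, i < name.toList.length → (name.toList.getD i 'A' == 'A') = true := by
      intro i hi
      by_contra hne
      have hnil : ((List.range name.toList.length).filter
          (fun i => !(name.toList.getD i 'A' == 'A'))) = [] := List.getLast?_eq_none_iff.mp hL
      have hmem2 := (hmem i).mpr ⟨hi, by simpa using hne⟩
      rw [hnil] at hmem2
      simp at hmem2
    have hB : calcMoves_alt r name = 1 := by
      simp only [calcMoves_alt]
      rw [hL]
    rw [hA0, hB, show 3 * name.toList.length + 3 = (3 * name.toList.length + 2) + 1 from rfl,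
      loop_allA r _ _ hall]
    norm_num
  · have hneL : ((List.range name.toList.length).filter
        (fun i => !(name.toList.getD i 'A' == 'A'))) ≠ [] := by
      intro e
      rw [e] at hL
      simp at hL
    have hmL : m ∈ ((List.range name.toList.length).filter
        (fun i => !(name.toList.getD i 'A' == 'A'))) := List.mem_of_getLast? hL
    have hm : m < name.toList.length := ((hmem m).mp hmL).1
    have hfm : (name.toList.getD m 'A' == 'A') = false := ((hmem m).mp hmL).2
    have hmax : ∀ j, m < j → j < name.toList.length → (name.toList.getD j 'A' == 'A') = true := by
      intro j hmj hjn
      by_contra hne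
      have hjmem := (hmem j).mpr ⟨hjn, by simpa using hne⟩
      have hle := pw_le_getLast _ hpw hneL j hjmem
      have hsome := List.getLast?_eq_some_getLast hneL
      rw [hL] at hsome
      have : m = _root_.List.getLast _ hneL := by injection hsome
      omega
    by_cases hcond : r < 0 ∨ (m : Int) ≤ r
    · -- pure forward phase
      have hB : calcMoves_alt r name = (m : Int) + 1 := by
        simp only [calcMoves_alt]
        rw [hL]
        simp [hcond]
      have hstate : mkVis name.toList.length (fun i => name.toList.getD i 'A' == 'A')
          = mkVis name.toList.length (fun i => (name.toList.getD i 'A' == 'A') || decide (i < 0)) := by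
        apply mkVis_congr
        intro i hi
        simp
      have hAval := loop_fwd r _ _ m hm hfm hmax hcond (3 * name.toList.length + 3) 0 0
        (by omega) (by omega)
      simp only [Nat.cast_zero] at hAval
      rw [hA0, hB, hstate, hAval]
      omega
    · push_neg at hcond
      obtain ⟨hr0, hrm⟩ := hcond
      have hrr : r = ((r.toNat : Nat) : Int) := (Int.toNat_of_nonneg hr0).symm
      -- the filtered tail list and its head mn
      have hpw2 : (((List.range name.toList.length).filter
          (fun i => !(name.toList.getD i 'A' == 'A'))).filter
          (fun (i : Nat) => decide (r < (i : Int)))).Pairwise (· < ·) := hpw.filter _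
      have hmF : m ∈ (((List.range name.toList.length).filter
          (fun i => !(name.toList.getD i 'A' == 'A'))).filter
          (fun (i : Nat) => decide (r < (i : Int)))) := by
        rw [List.mem_filter]
        exact ⟨hmL, by simpa using hrm⟩
      have hneF : (((List.range name.toList.length).filter
          (fun i => !(name.toList.getD i 'A' == 'A'))).filter
          (fun (i : Nat) => decide (r < (i : Int)))) ≠ [] := List.ne_nil_of_mem hmF
      have hhead : (((List.range name.toList.length).filter
          (fun i => !(name.toList.getD i 'A' == 'A'))).filter
          (fun (i : Nat) => decide (r < (i : Int)))).headD 0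
          = (((List.range name.toList.length).filter
          (fun i => !(name.toList.getD i 'A' == 'A'))).filter
          (fun (i : Nat) => decide (r < (i : Int)))).head hneF := by
        rw [List.headD_eq_head?, List.head?_eq_head hneF]
        rfl
      have hmnF : (((List.range name.toList.length).filter
          (fun i => !(name.toList.getD i 'A' == 'A'))).filter
          (fun (i : Nat) => decide (r < (i : Int)))).head hneF ∈ (((List.range name.toList.length).filter
          (fun i => !(name.toList.getD i 'A' == 'A'))).filter
          (fun (i : Nat) => decide (r < (i : Int)))) := List.head_mem hneF
      set mn := (((List.range name.toList.length).filter
          (fun i => !(name.toList.getD i 'A' == 'A'))).filter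
          (fun (i : Nat) => decide (r < (i : Int)))).head hneF with hmn_def
      rw [List.mem_filter] at hmnF
      have hmn : mn < name.toList.length := ((hmem mn).mp hmnF.1).1
      have hfmn : (name.toList.getD mn 'A' == 'A') = false := ((hmem mn).mp hmnF.1).2
      have hrmn : r.toNat < mn := by
        have := hmnF.2
        simp at this
        omega
      have hmin : ∀ j, r.toNat < j → j < mn → (name.toList.getD j 'A' == 'A') = true := by
        intro j hj1 hj2
        by_contra hne
        have hjn : j < name.toList.length := by omega
        have hjmem := (hmem j).mpr ⟨hjn, by simpa using hne⟩
        have hjF : j ∈ (((List.range name.toList.length).filter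
            (fun i => !(name.toList.getD i 'A' == 'A'))).filter
            (fun (i : Nat) => decide (r < (i : Int)))) := by
          rw [List.mem_filter]
          exact ⟨hjmem, by simp; omega⟩
        have := pw_head_le _ hpw2 j hjF hneF
        omega
      have hB : calcMoves_alt r name = 2 * r + (name.toList.length : Int) - (mn : Int) + 1 := by
        have hcf : ¬ (r < 0 ∨ (m : Int) ≤ r) := by push_neg; exact ⟨hr0, hrm⟩
        simp only [calcMoves_alt]
        rw [hL]
        simp only [if_neg hcf]
        rw [hhead]
      have hstate : mkVis name.toList.length (fun i => name.toList.getD i 'A' == 'A')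
          = mkVis name.toList.length (fun i => (name.toList.getD i 'A' == 'A') || decide (i < 0)) := by
        apply mkVis_congr
        intro i hi
        simp
      have hAval := loop_fwd2 r _ _ r.toNat mn hrr hmn hfmn hrmn hmin
        (3 * name.toList.length + 3) 0 0 (by omega) (by omega)
      simp only [Nat.cast_zero] at hAval
      rw [hA0, hB, hstate, hAval]
      omega
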